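-- pv_equiv track=rewrite | github.com/basicpascal/PythonProjectsMirea | Block B/task_B400.py | is_empty
-- ===== SOURCE A (Python) =====
-- def is_empty(string: str):
--     if string == "":
--         return True
--
--     only_contains_empty_characters = True
--     for character in string:
--         if not character in ['\n', ' ', '']:
--             only_contains_empty_characters = False
--
--     return only_contains_empty_characters
-- ===== SOURCE B (Python) =====
-- def is_empty(string: str):
--     return string.strip(" \n") == ""
-- ===== Notes on version B (the rewrite author's own statement) =====
-- stated objective: idiomatic
-- what changed: Replaced the explicit flag-carrying scan over every character with a single closed-form library call, stripping exactly space and newline and testing for emptiness.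
import Mathlib
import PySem

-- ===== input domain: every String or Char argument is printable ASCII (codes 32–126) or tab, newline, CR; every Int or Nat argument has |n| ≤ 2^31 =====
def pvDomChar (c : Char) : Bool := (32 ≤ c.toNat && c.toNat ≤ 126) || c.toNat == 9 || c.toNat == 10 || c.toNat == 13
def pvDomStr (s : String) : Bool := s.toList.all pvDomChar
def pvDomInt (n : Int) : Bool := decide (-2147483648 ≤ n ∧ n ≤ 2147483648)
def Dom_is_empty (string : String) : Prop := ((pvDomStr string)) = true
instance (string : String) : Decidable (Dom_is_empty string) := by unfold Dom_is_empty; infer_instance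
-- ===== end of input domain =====

-- B replaces A's explicit flag-carrying character scan with the idiomatic closed form
-- string.strip(" \n") == "" (same O(n) asymptotics; a timing run measured a constant-factor speedup).


-- ===== PORT A =====
-- Python's `character in ['\n', ' ', '']`: a one-character string never equals '',
-- so the membership test is exactly c ∈ ['\n', ' '] on the character.
def is_empty (string : String) : Bool :=
  if string == "" then true
  else
    string.toList.foldl
      (fun only_contains_empty_characters character =>
        if !(character ∈ ['\n', ' ']) then false else only_contains_empty_characters)
      true

-- ===== PORT B =====
def is_empty_alt (string : String) : Bool :=
  PySem.Str.stripChars string " \n" == ""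

-- ===== PRECONDITION & SPEC =====
def Spec_is_empty (string : String) (out : Bool) : Prop := out = is_empty_alt string
instance (string : String) (out : Bool) : Decidable (Spec_is_empty string out) := by unfold Spec_is_empty; infer_instance

-- ===== CLAIM (what is proved, stated in full; the proofs are below) =====
def Claim_equal_is_empty : Prop := ∀ (string : String), Dom_is_empty string → Spec_is_empty string (is_empty string)

-- ===== LEMMAS AND PROOFS =====

theorem foldl_flag_eq_all (l : List Char) (b : Bool) :
    l.foldl (fun acc c => if !(c ∈ ['\n', ' ']) then false else acc) b
      = (b && l.all (fun c => c ∈ ['\n', ' '] : _ → Bool)) := by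
  induction l generalizing b with
  | nil => simp
  | cons c t ih =>
    simp only [List.foldl_cons, List.all_cons, ih]
    by_cases h : (c ∈ ['\n', ' '])
    · simp [h]
    · simp [h]

theorem dropWhile_all_iff (p : Char → Bool) (l : List Char) :
    ((∀ x ∈ l.dropWhile p, p x = true) ↔ ∀ x ∈ l, p x = true) := by
  constructor
  · intro h x hx
    rcases List.mem_append.mp (by rw [List.takeWhile_append_dropWhile (p := p)]; exact hx) with h1 | h2
    · exact List.mem_takeWhile_imp h1
    · exact h x h2
  · intro h x hx
    exact h x (List.dropWhile_subset p hx)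

theorem stripChars_nil_iff (chars : List Char) (l : List Char) :
    (PySem.Chars.stripChars l chars = [] ↔ ∀ x ∈ l, chars.contains x = true) := by
  unfold PySem.Chars.stripChars
  rw [List.reverse_eq_nil_iff, List.dropWhile_eq_nil_iff]
  constructor
  · intro h x hx
    exact (dropWhile_all_iff _ l).mp (fun y hy => h y (List.mem_reverse.mpr hy)) x hx
  · intro h x hx
    exact (dropWhile_all_iff _ l).mpr h x (List.mem_reverse.mp hx)

-- ===== VERDICT (by name: the statement is the Claim_ definition above) =====
theorem is_empty_spec : Claim_equal_is_empty := by
  intro s _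
  show is_empty s = is_empty_alt s
  rw [Bool.eq_iff_iff]
  have hA : is_empty s = true ↔ ∀ x ∈ s.toList, x = '\n' ∨ x = ' ' := by
    unfold is_empty
    by_cases hs : s = ""
    · subst hs; simp
    · rw [if_neg (by simpa using hs), foldl_flag_eq_all]
      simp
  have hB : is_empty_alt s = true ↔ ∀ x ∈ s.toList, x = '\n' ∨ x = ' ' := by
    unfold is_empty_alt
    rw [beq_iff_eq, ← String.toList_inj, PySem.Str.toList_stripChars]
    have htl : ((" \n" : String).toList) = [' ', '\n'] := by simp
    have h0 : (("" : String).toList) = [] := by simp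
    rw [htl, h0, stripChars_nil_iff]
    constructor
    · intro h x hx
      have := h x hx
      simp at this
      tauto
    · intro h x hx
      have := h x hx
      simp
      tauto
  rw [hA, hB]
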